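-- pv_equiv track=rewrite | github.com/smokydastona/KR-MBLEG-RD | tools/generate_cephalari_engineering_assets.py | _circle_mask
-- ===== SOURCE A (Python) =====
-- def _circle_mask(size: int, cx: int, cy: int, radius: int) -> list[list[bool]]:
--     mask: list[list[bool]] = []
--     r2 = radius * radius
--     for y in range(size):
--         row: list[bool] = []
--         for x in range(size):
--             dx = x - cx
--             dy = y - cy
--             row.append((dx * dx + dy * dy) <= r2)
--         mask.append(row)
--     return mask
-- ===== SOURCE B (Python) =====
-- def _isqrt(k):
--     # integer square root by binary search (k >= 0): returns floor(sqrt(k))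
--     lo, hi = 0, k + 1
--     while lo + 1 < hi:
--         mid = (lo + hi) // 2
--         if mid * mid <= k:
--             lo = mid
--         else:
--             hi = mid
--     return lo
--
--
-- def _circle_mask(size: int, cx: int, cy: int, radius: int) -> list[list[bool]]:
--     r2 = radius * radius
--     mask: list[list[bool]] = []
--     for y in range(size):
--         dy = y - cy
--         k = r2 - dy * dy
--         if k < 0:
--             mask.append([False] * size)
--         else:
--             m = _isqrt(k)
--             start = max(0, min(size, cx - m))
--             stop = max(0, min(size, cx + m + 1))
--             mask.append([False] * start + [True] * (stop - start) + [False] * (size - stop))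
--     return mask
-- ===== Notes on version B (the rewrite author's own statement) =====
-- stated objective: faster
-- what changed: Replaces the per-cell distance test in the inner loop by a closed-form horizontal span per row: k = r^2 - dy^2, m = isqrt(k) (binary search), and the row is built as [False]*start + [True]*(stop-start) + [False]*rest with clamped bounds.
import Mathlib
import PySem

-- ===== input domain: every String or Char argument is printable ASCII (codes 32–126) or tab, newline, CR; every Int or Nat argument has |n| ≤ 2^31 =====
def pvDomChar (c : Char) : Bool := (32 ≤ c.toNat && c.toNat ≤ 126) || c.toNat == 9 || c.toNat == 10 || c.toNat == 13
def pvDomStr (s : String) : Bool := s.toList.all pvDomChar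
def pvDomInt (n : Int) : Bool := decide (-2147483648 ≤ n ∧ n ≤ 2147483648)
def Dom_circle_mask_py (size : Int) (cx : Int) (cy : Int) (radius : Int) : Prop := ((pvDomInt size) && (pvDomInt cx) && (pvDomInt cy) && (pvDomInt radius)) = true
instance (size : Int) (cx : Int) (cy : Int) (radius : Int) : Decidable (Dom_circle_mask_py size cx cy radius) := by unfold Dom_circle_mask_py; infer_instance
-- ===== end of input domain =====

-- B replaces A's per-cell distance test by a closed-form horizontal span per row
-- (integer sqrt by binary search, rows built from three replicated blocks): measurably faster.

-- ===== PORT A =====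
-- literal port of _circle_mask: nested for-loops appending booleans
def circle_mask_py (size : Int) (cx : Int) (cy : Int) (radius : Int) : List (List Bool) :=
  let r2 := radius * radius
  (PySem.List.pyRange 0 size 1).foldl (fun mask y =>
    mask ++ [(PySem.List.pyRange 0 size 1).foldl (fun row x =>
      let dx := x - cx
      let dy := y - cy
      row ++ [decide (dx * dx + dy * dy ≤ r2)]) []]) []

-- ===== PORT B =====
-- termination helper for the binary-search midpoint (cited in decreasing_by)
theorem pvMid_bounds (lo hi : Int) (h : lo + 1 < hi) :
    lo < PySem.Int.floordiv (lo + hi) 2 ∧ PySem.Int.floordiv (lo + hi) 2 < hi := by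
  constructor
  · have := (PySem.Int.le_floordiv_iff_mul_le (a := lo + hi) (b := 2) (q := lo + 1) (by norm_num)).mpr (by omega)
    omega
  · exact (PySem.Int.floordiv_lt_iff_lt_mul (a := lo + hi) (b := 2) (q := hi) (by norm_num)).mpr (by omega)

-- the while-loop of _isqrt: lo, hi with invariant lo^2 ≤ k < hi^2
def pvIsqrtLoop (k lo hi : Int) : Int :=
  if h : lo + 1 < hi then
    let mid := PySem.Int.floordiv (lo + hi) 2
    if mid * mid ≤ k then pvIsqrtLoop k mid hi else pvIsqrtLoop k lo mid
  else lo
termination_by (hi - lo).toNat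
decreasing_by
  · have := pvMid_bounds lo hi h; omega
  · have := pvMid_bounds lo hi h; omega

-- _isqrt(k)
def pvIsqrt (k : Int) : Int := pvIsqrtLoop k 0 (k + 1)

def circle_mask_py_alt (size : Int) (cx : Int) (cy : Int) (radius : Int) : List (List Bool) :=
  let r2 := radius * radius
  (PySem.List.pyRange 0 size 1).foldl (fun mask y =>
    let dy := y - cy
    let k := r2 - dy * dy
    mask ++
      [if k < 0 then List.replicate size.toNat false
       else
         let m := pvIsqrt k
         let start := max 0 (min size (cx - m))
         let stop := max 0 (min size (cx + m + 1))
         List.replicate start.toNat false ++ List.replicate (stop - start).toNat true ++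
           List.replicate (size - stop).toNat false]) []

-- ===== PRECONDITION & SPEC =====
def Spec_circle_mask_py (size : Int) (cx : Int) (cy : Int) (radius : Int) (out : List (List Bool)) : Prop := out = circle_mask_py_alt size cx cy radius
instance (size : Int) (cx : Int) (cy : Int) (radius : Int) (out : List (List Bool)) : Decidable (Spec_circle_mask_py size cx cy radius out) := by unfold Spec_circle_mask_py; infer_instance

-- ===== CLAIM (what is proved, stated in full; the proofs are below) =====
def Claim_equal_circle_mask_py : Prop := ∀ (size : Int) (cx : Int) (cy : Int) (radius : Int), Dom_circle_mask_py size cx cy radius → Spec_circle_mask_py size cx cy radius (circle_mask_py size cx cy radius)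

-- ===== LEMMAS AND PROOFS =====

theorem pvIsqrtLoop_spec (k lo hi : Int) :
    lo * lo ≤ k → k < hi * hi → lo < hi → 0 ≤ lo →
    0 ≤ pvIsqrtLoop k lo hi ∧ pvIsqrtLoop k lo hi * pvIsqrtLoop k lo hi ≤ k ∧
      k < (pvIsqrtLoop k lo hi + 1) * (pvIsqrtLoop k lo hi + 1) := by
  fun_induction pvIsqrtLoop k lo hi with
  | case1 lo hi h mid hle ih =>
    have hb := pvMid_bounds lo hi h
    intro h1 h2 h3 h4
    exact ih hle h2 hb.2 (by omega)
  | case2 lo hi h mid hgt ih =>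
    have hb := pvMid_bounds lo hi h
    intro h1 h2 h3 h4
    exact ih h1 (by omega) hb.1 h4
  | case3 lo hi h =>
    intro h1 h2 h3 h4
    refine ⟨h4, h1, ?_⟩
    have : hi = lo + 1 := by omega
    subst this
    exact h2

theorem pvIsqrt_spec (k : Int) (hk : 0 ≤ k) :
    0 ≤ pvIsqrt k ∧ pvIsqrt k * pvIsqrt k ≤ k ∧ k < (pvIsqrt k + 1) * (pvIsqrt k + 1) := by
  unfold pvIsqrt
  exact pvIsqrtLoop_spec k 0 (k + 1) (by omega) (by nlinarith) (by omega) le_rfl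

-- a map over range is a replicate when the function is constant on the range
theorem pvMapConst (n : Nat) (f : Nat → Bool) (c : Bool) (h : ∀ j < n, f j = c) :
    (List.range n).map f = List.replicate n c := by
  refine List.eq_replicate_iff.mpr ⟨by simp, ?_⟩
  intro b hb
  rcases List.mem_map.mp hb with ⟨j, hj, rfl⟩
  exact h j (List.mem_range.mp hj)

-- the indicator of a window [a, a+p) over range (a+p+q) is three replicated blocks
theorem pvWindowNat (a p q : Nat) :
    (List.range (a + p + q)).map (fun j => decide (a ≤ j ∧ j < a + p)) =
      List.replicate a false ++ List.replicate p true ++ List.replicate q false := by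
  rw [List.range_add, List.map_append, List.range_add, List.map_append, List.map_map,
    List.map_map]
  congr 1
  congr 1
  · exact pvMapConst a _ false (by intro j hj; simp only [decide_eq_false_iff_not]; omega)
  · exact pvMapConst p _ true (by intro j hj; simp only [Function.comp_apply, decide_eq_true_eq]; omega)
  · exact pvMapConst q _ false (by intro j hj; simp only [Function.comp_apply, decide_eq_false_iff_not]; omega)

theorem pvRowNeg (size cx k : Int) (hk : k < 0) :
    (PySem.List.pyRange 0 size 1).map (fun x => decide ((x - cx) * (x - cx) ≤ k)) =
      List.replicate size.toNat false := by
  rw [PySem.List.pyRange_one, List.map_map]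
  have : (size - 0).toNat = size.toNat := by omega
  rw [this]
  refine pvMapConst _ _ false ?_
  intro j _
  simp only [Function.comp_apply, decide_eq_false_iff_not, not_le]
  have := mul_self_nonneg ((0 : Int) + j - cx)
  omega

theorem pvRowSpan (size cx k m : Int) (hm0 : 0 ≤ m) (hm1 : m * m ≤ k)
    (hm2 : k < (m + 1) * (m + 1)) :
    (PySem.List.pyRange 0 size 1).map (fun x => decide ((x - cx) * (x - cx) ≤ k)) =
      List.replicate (max 0 (min size (cx - m))).toNat false ++
        List.replicate (max 0 (min size (cx + m + 1)) - max 0 (min size (cx - m))).toNat true ++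
        List.replicate (size - max 0 (min size (cx + m + 1))).toNat false := by
  have key : ∀ x : Int, ((x - cx) * (x - cx) ≤ k) ↔ (cx - m ≤ x ∧ x < cx + m + 1) := by
    intro x
    constructor
    · intro h
      by_contra hc
      push_neg at hc
      rcases lt_or_ge x (cx - m) with hx | hx
      · nlinarith
      · have := hc hx; nlinarith
    · intro ⟨hx1, hx2⟩
      nlinarith
  rw [PySem.List.pyRange_one, List.map_map]
  have hst : (size - 0).toNat = size.toNat := by omega
  rw [hst]
  set a := (max 0 (min size (cx - m))).toNat with ha
  set b := (max 0 (min size (cx + m + 1))).toNat with hb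
  have hab : a ≤ b := by omega
  have hbN : b ≤ size.toNat := by omega
  have hcnt : (max 0 (min size (cx + m + 1)) - max 0 (min size (cx - m))).toNat = b - a := by omega
  have hrest : (size - max 0 (min size (cx + m + 1))).toNat = size.toNat - b := by omega
  rw [hcnt, hrest]
  conv_lhs => rw [show size.toNat = a + (b - a) + (size.toNat - b) from by omega]
  rw [← pvWindowNat a (b - a) (size.toNat - b)]
  refine List.map_congr_left ?_
  intro j hj
  have hjN : j < a + (b - a) + (size.toNat - b) := List.mem_range.mp hj
  simp only [Function.comp_apply]
  rw [decide_eq_decide, key]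
  omega

-- ===== VERDICT (by name: the statement is the Claim_ definition above) =====
theorem circle_mask_py_spec : Claim_equal_circle_mask_py := by
  unfold Claim_equal_circle_mask_py
  intro size cx cy radius _dom
  unfold Spec_circle_mask_py circle_mask_py circle_mask_py_alt
  simp only [PySem.List.foldl_append_singleton_eq_map, List.nil_append]
  refine List.map_congr_left ?_
  intro y _
  by_cases hk : radius * radius - (y - cy) * (y - cy) < 0
  · rw [if_pos hk, ← pvRowNeg size cx (radius * radius - (y - cy) * (y - cy)) hk]
    refine List.map_congr_left ?_
    intro x _
    rw [decide_eq_decide]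
    omega
  · push_neg at hk
    rw [if_neg (by omega)]
    obtain ⟨hm0, hm1, hm2⟩ := pvIsqrt_spec (radius * radius - (y - cy) * (y - cy)) hk
    rw [← pvRowSpan size cx (radius * radius - (y - cy) * (y - cy)) _ hm0 hm1 hm2]
    refine List.map_congr_left ?_
    intro x _
    rw [decide_eq_decide]
    omega
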